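-- pv_equiv track=rewrite | github.com/yarduoc/HexAI | Python/BaseHex.py | cellMemeCouleur
-- ===== SOURCE A (Python) =====
-- def estDans(tableau, cellule):
--     abs = cellule[0]
--     ord = cellule[1]
--     l = len(tableau)-1
--     if 0 > abs or abs > l or 0 > ord or ord > l :
--         return False
--     return True
--
-- def cellProxy (plateau, cellule):
--     l = len(plateau)-1
--     n = cellule[0]
--     k = cellule[1]
--     s = []
--     for x in range (n-1, n+2) :
--         for y in range (k-1, k+2):
--             if estDans(plateau, [x,y]) :
--                 if [x,y] != [n-1, k-1] and [x,y] != [n+1, k+1] and [x,y] != cellule :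
--                     s.append([x,y])
--     return s
--
-- def valeur(plateau, cellule):
--     return plateau[cellule[0]][cellule[1]]
--
-- def cellMemeCouleur (plateau, cellule):
--     couleur = valeur(plateau, cellule)
--     sortie = []
--     T = cellProxy(plateau, cellule)
--     for x in T:
--         if valeur(plateau, x) == couleur :
--             sortie.append(x)
--     return sortie
-- ===== SOURCE B (Python) =====
-- def cellMemeCouleur(plateau, cellule):
--     n, k = cellule[0], cellule[1]
--     couleur = plateau[n][k]
--     size = len(plateau)
--     return [[i, j] for i in range(size) for j in range(size)
--             if abs(i - n) <= 1 and abs(j - k) <= 1 and abs((i - n) + (j - k)) <= 1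
--             and [i, j] != cellule and plateau[i][j] == couleur]
-- ===== Notes on version B (the rewrite author's own statement) =====
-- stated objective: alternative
-- what changed: B inverts the traversal: instead of enumerating a 3x3 window around the cell and filtering the resulting neighbour list in a second pass (A's estDans/cellProxy/valeur pipeline), B scans the whole board row-major once and keeps each board cell whose offset from the queried cell satisfies the hex-adjacency inequalities |di|<=1, |dj|<=1, |di+dj|<=1, is not the queried cell itself, and has the matching colour.
import Mathlib
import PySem

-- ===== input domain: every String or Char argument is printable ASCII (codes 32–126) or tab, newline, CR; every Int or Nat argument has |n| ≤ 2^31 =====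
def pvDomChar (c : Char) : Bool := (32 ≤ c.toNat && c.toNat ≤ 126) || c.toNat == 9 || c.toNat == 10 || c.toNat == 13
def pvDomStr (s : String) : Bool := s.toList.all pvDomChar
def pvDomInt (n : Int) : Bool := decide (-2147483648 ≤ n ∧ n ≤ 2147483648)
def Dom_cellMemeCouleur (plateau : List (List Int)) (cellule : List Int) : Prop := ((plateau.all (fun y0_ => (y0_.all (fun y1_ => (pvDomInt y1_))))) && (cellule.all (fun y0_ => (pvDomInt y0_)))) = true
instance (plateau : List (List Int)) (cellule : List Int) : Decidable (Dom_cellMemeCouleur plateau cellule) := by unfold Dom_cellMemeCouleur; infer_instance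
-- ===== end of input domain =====

-- B inverts the traversal: a single row-major scan of the whole board keeping cells that are
-- hex-adjacent to the queried cell (|di| ≤ 1, |dj| ≤ 1, |di+dj| ≤ 1, not the cell itself) and
-- share its colour (objective: alternative, not faster).

-- ===== PORT A =====
def estDans (tableau : List (List Int)) (cellule : List Int) : Bool :=
  let a := PySem.List.pyGetD cellule 0 0
  let o := PySem.List.pyGetD cellule 1 0
  let l : Int := (tableau.length : Int) - 1
  if 0 > a ∨ a > l ∨ 0 > o ∨ o > l then false else true

def cellProxy (plateau : List (List Int)) (cellule : List Int) : List (List Int) :=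
  let n := PySem.List.pyGetD cellule 0 0
  let k := PySem.List.pyGetD cellule 1 0
  (PySem.List.pyRange (n-1) (n+2) 1).foldl (fun s x =>
    (PySem.List.pyRange (k-1) (k+2) 1).foldl (fun s y =>
      if estDans plateau [x, y] then
        if [x, y] ≠ [n-1, k-1] ∧ [x, y] ≠ [n+1, k+1] ∧ [x, y] ≠ cellule then
          s ++ [[x, y]]
        else s
      else s) s) []

def valeur (plateau : List (List Int)) (cellule : List Int) : Int :=
  PySem.List.pyGetD (PySem.List.pyGetD plateau (PySem.List.pyGetD cellule 0 0) [])
    (PySem.List.pyGetD cellule 1 0) 0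

def cellMemeCouleur (plateau : List (List Int)) (cellule : List Int) : List (List Int) :=
  let couleur := valeur plateau cellule
  let T := cellProxy plateau cellule
  T.foldl (fun sortie x => if valeur plateau x == couleur then sortie ++ [x] else sortie) []

-- ===== PORT B =====
def hexDirs : List (Int × Int) := [(-1, 0), (-1, 1), (0, -1), (0, 1), (1, -1), (1, 0)]

def cellMemeCouleur_alt (plateau : List (List Int)) (cellule : List Int) : List (List Int) :=
  let n := PySem.List.pyGetD cellule 0 0
  let k := PySem.List.pyGetD cellule 1 0
  let couleur := PySem.List.pyGetD (PySem.List.pyGetD plateau n []) k 0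
  let size := plateau.length
  (List.range size).foldl (fun acc (i : Nat) =>
    (List.range size).foldl (fun acc (j : Nat) =>
      if |(i : Int) - n| ≤ 1 ∧ |(j : Int) - k| ≤ 1 ∧ |((i : Int) - n) + ((j : Int) - k)| ≤ 1 ∧
         ([(i : Int), (j : Int)] : List Int) ≠ cellule ∧
         PySem.List.pyGetD (PySem.List.pyGetD plateau (i : Int) []) (j : Int) 0 == couleur
      then acc ++ [[(i : Int), (j : Int)]] else acc) acc) []

-- ===== PRECONDITION & SPEC =====
-- Pre_ excludes exactly the inputs on which A raises: cellule shorter than 2 (IndexError on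
-- cellule[1]), a centre index pair on which plateau[n][k] raises, and ragged boards where an
-- in-bounds (by A's square len(plateau)-1 test) neighbour's row is too short for its column
-- (IndexError in the colour test).
def Pre_cellMemeCouleur (plateau : List (List Int)) (cellule : List Int) : Prop :=
  2 ≤ cellule.length ∧
    let n := cellule.getD 0 0
    let k := cellule.getD 1 0
    PySem.List.pyGet? plateau n ≠ none ∧
    PySem.List.pyGet? ((PySem.List.pyGet? plateau n).getD []) k ≠ none ∧
    ∀ d ∈ hexDirs,
      (0 ≤ n + d.1 ∧ n + d.1 ≤ (plateau.length : Int) - 1 ∧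
       0 ≤ k + d.2 ∧ k + d.2 ≤ (plateau.length : Int) - 1) →
      PySem.List.pyGet? ((PySem.List.pyGet? plateau (n + d.1)).getD []) (k + d.2) ≠ none
instance (plateau : List (List Int)) (cellule : List Int) : Decidable (Pre_cellMemeCouleur plateau cellule) := by unfold Pre_cellMemeCouleur; infer_instance

def pvWitness_cellMemeCouleur : List (List Int) × List Int := ([[1, 2], [1, 1]], [0, 1])

def Spec_cellMemeCouleur (plateau : List (List Int)) (cellule : List Int) (out : List (List Int)) : Prop := out = cellMemeCouleur_alt plateau cellule
instance (plateau : List (List Int)) (cellule : List Int) (out : List (List Int)) : Decidable (Spec_cellMemeCouleur plateau cellule out) := by unfold Spec_cellMemeCouleur; infer_instance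

-- ===== CLAIM (what is proved, stated in full; the proofs are below) =====
def Claim_equal_cellMemeCouleur : Prop := ∀ (plateau : List (List Int)) (cellule : List Int), Dom_cellMemeCouleur plateau cellule → Pre_cellMemeCouleur plateau cellule → Spec_cellMemeCouleur plateau cellule (cellMemeCouleur plateau cellule)

-- ===== LEMMAS AND PROOFS =====

-- one same-coloured in-bounds candidate cell of the shared normal form
def cellT (plateau : List (List Int)) (couleur x y : Int) : List (List Int) :=
  if 0 ≤ x ∧ x ≤ (plateau.length : Int) - 1 ∧ 0 ≤ y ∧ y ≤ (plateau.length : Int) - 1 ∧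
     PySem.List.pyGetD (PySem.List.pyGetD plateau x []) y 0 = couleur
  then [[x, y]] else []

-- column targets of the board scan in row t (relative to the centre row n); the flag says
-- whether the centre column itself is kept (cellule longer than 2, never equal to a pair)
def rowCols (n k t : Int) (c : Bool) : List Int :=
  if t = n - 1 then [k, k + 1]
  else if t = n then (if c then [k - 1, k, k + 1] else [k - 1, k + 1])
  else [k - 1, k]

def gRow (plateau : List (List Int)) (couleur n k t : Int) (c : Bool) : List (List Int) :=
  (rowCols n k t c).flatMap (fun u =>
    if 0 ≤ u ∧ u < (plateau.length : Int) then
      (if PySem.List.pyGetD (PySem.List.pyGetD plateau t []) u 0 == couleur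
       then [[t, u]] else [])
    else [])

theorem flatMap_range_targets {α : Type} (ts : List Int) (g : Int → List α)
    (hts : ts.Pairwise (· < ·)) (m : Nat) (f : Nat → List α)
    (hf : ∀ i : Nat, i < m → f i = if (i : Int) ∈ ts then g (i : Int) else []) :
    (List.range m).flatMap f
      = ts.flatMap (fun t => if 0 ≤ t ∧ t < (m : Int) then g t else []) := by
  induction m with
  | zero =>
    simp only [List.range_zero, List.flatMap_nil, Nat.cast_zero]
    symm
    rw [List.flatMap_eq_nil_iff]
    intro t _
    rw [if_neg (by omega)]
  | succ m ih =>
    have hcast : ((m + 1 : Nat) : Int) = (m : Int) + 1 := by push_cast; ring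
    rw [List.range_succ, List.flatMap_append, ih (fun i h => hf i (by omega))]
    simp only [List.flatMap_cons, List.flatMap_nil, List.append_nil, hcast]
    rw [hf m (by omega)]
    by_cases hm : (m : Int) ∈ ts
    · obtain ⟨ts1, ts2, rfl⟩ := List.append_of_mem hm
      have hp := List.pairwise_append.mp hts
      have hlt1 : ∀ t ∈ ts1, t < (m : Int) := fun t ht => hp.2.2 t ht _ List.mem_cons_self
      have hgt2 : ∀ t ∈ ts2, (m : Int) < t := (List.pairwise_cons.mp hp.2.1).1
      rw [if_pos hm]
      simp only [List.flatMap_append, List.flatMap_cons]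
      rw [List.flatMap_congr (l := ts1)
            (g := fun t => if 0 ≤ t ∧ t < (m : Int) + 1 then g t else [])
            (by intro t ht; dsimp only; have := hlt1 t ht; split_ifs <;> first | rfl | omega)]
      rw [(List.flatMap_eq_nil_iff (l := ts2)
            (f := fun t => if 0 ≤ t ∧ t < (m : Int) then g t else [])).mpr
            (fun t ht => by have := hgt2 t ht; exact if_neg (by omega))]
      rw [(List.flatMap_eq_nil_iff (l := ts2)
            (f := fun t => if 0 ≤ t ∧ t < (m : Int) + 1 then g t else [])).mpr
            (fun t ht => by have := hgt2 t ht; exact if_neg (by omega))]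
      rw [if_neg (by omega), if_pos (by omega)]
      simp
    · rw [if_neg hm, List.append_nil]
      apply List.flatMap_congr
      intro t ht
      dsimp only
      have : t ≠ (m : Int) := fun h => hm (h ▸ ht)
      split_ifs <;> first | rfl | omega

theorem filtermap_eq_flatMap {α β : Type} (l : List α) (p : α → Prop) [DecidablePred p]
    (f : α → β) :
    ((l.filter (fun x => decide (p x))).map f)
      = l.flatMap (fun x => if p x then [f x] else []) := by
  induction l with
  | nil => rfl
  | cons a l ih => by_cases h : p a <;> simp [h, ih]

theorem B_unfold (plateau : List (List Int)) (cellule : List Int) :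
    cellMemeCouleur_alt plateau cellule
      = (List.range plateau.length).flatMap (fun (i : Nat) =>
          (List.range plateau.length).flatMap (fun (j : Nat) =>
            if |(i : Int) - PySem.List.pyGetD cellule 0 0| ≤ 1 ∧
               |(j : Int) - PySem.List.pyGetD cellule 1 0| ≤ 1 ∧
               |((i : Int) - PySem.List.pyGetD cellule 0 0) +
                  ((j : Int) - PySem.List.pyGetD cellule 1 0)| ≤ 1 ∧
               ([(i : Int), (j : Int)] : List Int) ≠ cellule ∧
               PySem.List.pyGetD (PySem.List.pyGetD plateau (i : Int) []) (j : Int) 0 ==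
                 PySem.List.pyGetD
                   (PySem.List.pyGetD plateau (PySem.List.pyGetD cellule 0 0) [])
                   (PySem.List.pyGetD cellule 1 0) 0
            then [[(i : Int), (j : Int)]] else [])) := by
  simp only [cellMemeCouleur_alt]
  have h : ∀ (acc : List (List Int)) (i : Nat),
      (List.range plateau.length).foldl (fun acc (j : Nat) =>
        if |(i : Int) - PySem.List.pyGetD cellule 0 0| ≤ 1 ∧
           |(j : Int) - PySem.List.pyGetD cellule 1 0| ≤ 1 ∧
           |((i : Int) - PySem.List.pyGetD cellule 0 0) +
              ((j : Int) - PySem.List.pyGetD cellule 1 0)| ≤ 1 ∧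
           ([(i : Int), (j : Int)] : List Int) ≠ cellule ∧
           PySem.List.pyGetD (PySem.List.pyGetD plateau (i : Int) []) (j : Int) 0 ==
             PySem.List.pyGetD
               (PySem.List.pyGetD plateau (PySem.List.pyGetD cellule 0 0) [])
               (PySem.List.pyGetD cellule 1 0) 0
        then acc ++ [[(i : Int), (j : Int)]] else acc) acc
      = acc ++ (List.range plateau.length).flatMap (fun (j : Nat) =>
          if |(i : Int) - PySem.List.pyGetD cellule 0 0| ≤ 1 ∧
             |(j : Int) - PySem.List.pyGetD cellule 1 0| ≤ 1 ∧
             |((i : Int) - PySem.List.pyGetD cellule 0 0) +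
                ((j : Int) - PySem.List.pyGetD cellule 1 0)| ≤ 1 ∧
             ([(i : Int), (j : Int)] : List Int) ≠ cellule ∧
             PySem.List.pyGetD (PySem.List.pyGetD plateau (i : Int) []) (j : Int) 0 ==
               PySem.List.pyGetD
                 (PySem.List.pyGetD plateau (PySem.List.pyGetD cellule 0 0) [])
                 (PySem.List.pyGetD cellule 1 0) 0
          then [[(i : Int), (j : Int)]] else []) := by
    intro acc i
    rw [PySem.List.foldl_append_ite, filtermap_eq_flatMap]
  simp only [h]
  rw [PySem.List.foldl_append_eq_flatMap]
  simp

theorem notpair_top (n k x y : Int) (rest : List Int) (h : x ≠ n) :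
    ([x, y] : List Int) ≠ n :: k :: rest := by
  intro he; injection he with h1 _; exact h h1

theorem notpair_mid (n k y : Int) (rest : List Int) (h : y ≠ k ∨ rest ≠ []) :
    ([n, y] : List Int) ≠ n :: k :: rest := by
  intro he
  injection he with _ h2
  injection h2 with h2a h2b
  rcases h with h | h
  · exact h h2a
  · exact h h2b.symm

theorem inner_row (plateau : List (List Int)) (couleur n k : Int) (rest : List Int) (i : Nat) :
    (List.range plateau.length).flatMap (fun (j : Nat) =>
        if |(i : Int) - n| ≤ 1 ∧ |(j : Int) - k| ≤ 1 ∧ |((i : Int) - n) + ((j : Int) - k)| ≤ 1 ∧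
           ([(i : Int), (j : Int)] : List Int) ≠ n :: k :: rest ∧
           PySem.List.pyGetD (PySem.List.pyGetD plateau (i : Int) []) (j : Int) 0 == couleur
        then [[(i : Int), (j : Int)]] else [])
      = if (i : Int) ∈ [n - 1, n, n + 1] then gRow plateau couleur n k (i : Int) (!rest.isEmpty)
        else [] := by
  by_cases h1 : (i : Int) = n - 1
  · rw [flatMap_range_targets [k, k + 1]
        (fun u => if PySem.List.pyGetD (PySem.List.pyGetD plateau (i:Int) []) u 0 == couleur
                  then [[(i:Int), u]] else [])
        (by simp) plateau.length _
        (by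
          intro j hj
          refine (if_congr ?_ rfl rfl).trans (ite_and _ _ _ _)
          constructor
          · rintro ⟨-, hb, hc, -, he⟩
            refine ⟨?_, he⟩
            rw [abs_le] at hb hc
            simp only [List.mem_cons, List.not_mem_nil, or_false]
            omega
          · rintro ⟨hm, he⟩
            simp only [List.mem_cons, List.not_mem_nil, or_false] at hm
            exact ⟨by rw [abs_le]; omega, by rw [abs_le]; omega, by rw [abs_le]; omega,
              notpair_top n k (i : Int) (j : Int) rest (by omega), he⟩)]
    rw [if_pos (by simp [h1])]
    simp [gRow, rowCols, h1]
  · by_cases h2 : (i : Int) = n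
    · cases rest with
      | nil =>
        rw [flatMap_range_targets [k - 1, k + 1]
            (fun u => if PySem.List.pyGetD (PySem.List.pyGetD plateau (i:Int) []) u 0 == couleur
                      then [[(i:Int), u]] else [])
            (by simp) plateau.length _
            (by
              intro j hj
              refine (if_congr ?_ rfl rfl).trans (ite_and _ _ _ _)
              constructor
              · rintro ⟨-, hb, -, hd, he⟩
                refine ⟨?_, he⟩
                have hk : (j : Int) ≠ k := fun hkk => hd (by rw [h2, hkk])
                rw [abs_le] at hb
                simp only [List.mem_cons, List.not_mem_nil, or_false]
                omega
              · rintro ⟨hm, he⟩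
                simp only [List.mem_cons, List.not_mem_nil, or_false] at hm
                refine ⟨by rw [abs_le]; omega, by rw [abs_le]; omega,
                  by rw [abs_le]; omega, ?_, he⟩
                rw [h2]
                exact notpair_mid n k (j : Int) [] (Or.inl (by omega)))]
        rw [if_pos (by simp [h2])]
        simp [gRow, rowCols, h2, show ¬(n = n - 1) by omega]
      | cons a t =>
        rw [flatMap_range_targets [k - 1, k, k + 1]
            (fun u => if PySem.List.pyGetD (PySem.List.pyGetD plateau (i:Int) []) u 0 == couleur
                      then [[(i:Int), u]] else [])
            (by simp) plateau.length _
            (by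
              intro j hj
              refine (if_congr ?_ rfl rfl).trans (ite_and _ _ _ _)
              constructor
              · rintro ⟨-, hb, -, -, he⟩
                refine ⟨?_, he⟩
                rw [abs_le] at hb
                simp only [List.mem_cons, List.not_mem_nil, or_false]
                omega
              · rintro ⟨hm, he⟩
                simp only [List.mem_cons, List.not_mem_nil, or_false] at hm
                refine ⟨by rw [abs_le]; omega, by rw [abs_le]; omega,
                  by rw [abs_le]; omega, ?_, he⟩
                rw [h2]
                exact notpair_mid n k (j : Int) (a :: t) (Or.inr (by simp)))]
        rw [if_pos (by simp [h2])]
        simp [gRow, rowCols, h2, show ¬(n = n - 1) by omega]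
    · by_cases h3 : (i : Int) = n + 1
      · rw [flatMap_range_targets [k - 1, k]
            (fun u => if PySem.List.pyGetD (PySem.List.pyGetD plateau (i:Int) []) u 0 == couleur
                      then [[(i:Int), u]] else [])
            (by simp) plateau.length _
            (by
              intro j hj
              refine (if_congr ?_ rfl rfl).trans (ite_and _ _ _ _)
              constructor
              · rintro ⟨-, hb, hc, -, he⟩
                refine ⟨?_, he⟩
                rw [abs_le] at hb hc
                simp only [List.mem_cons, List.not_mem_nil, or_false]
                omega
              · rintro ⟨hm, he⟩
                simp only [List.mem_cons, List.not_mem_nil, or_false] at hm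
                exact ⟨by rw [abs_le]; omega, by rw [abs_le]; omega, by rw [abs_le]; omega,
                  notpair_top n k (i : Int) (j : Int) rest (by omega), he⟩)]
        rw [if_pos (by simp [h3])]
        simp [gRow, rowCols, h3, show ¬(n + 1 = n - 1) by omega, show ¬(n + 1 = n) by omega]
      · rw [if_neg (by simp only [List.mem_cons, List.not_mem_nil, or_false]; omega)]
        rw [List.flatMap_eq_nil_iff]
        intro j hj
        rw [if_neg]
        rintro ⟨ha, -⟩
        rw [abs_le] at ha
        omega

theorem ite_append_nil {α : Type} (b : Prop) [Decidable b] (P Q : List α) :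
    (if b then P ++ Q else []) = (if b then P else []) ++ (if b then Q else []) := by
  split_ifs <;> simp

theorem toCellT (plateau : List (List Int)) (c x y : Int) :
    (if 0 ≤ x ∧ x < (plateau.length : Int) then
       (if 0 ≤ y ∧ y < (plateau.length : Int) then
          (if PySem.List.pyGetD (PySem.List.pyGetD plateau x []) y 0 == c then [[x, y]] else [])
        else [])
     else []) = cellT plateau c x y := by
  simp only [cellT, beq_iff_eq]
  split_ifs <;> first | rfl | omega

theorem centerT (plateau : List (List Int)) (n k : Int) :
    cellT plateau (PySem.List.pyGetD (PySem.List.pyGetD plateau n []) k 0) n k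
      = (if 0 ≤ n ∧ n ≤ (plateau.length : Int) - 1 ∧ 0 ≤ k ∧ k ≤ (plateau.length : Int) - 1
         then [[n, k]] else []) := by
  simp only [cellT]
  exact if_congr (by tauto) rfl rfl

theorem B_eq (plateau : List (List Int)) (n k : Int) (rest : List Int) :
    cellMemeCouleur_alt plateau (n :: k :: rest) =
      cellT plateau (PySem.List.pyGetD (PySem.List.pyGetD plateau n []) k 0) (n-1) k ++
      cellT plateau (PySem.List.pyGetD (PySem.List.pyGetD plateau n []) k 0) (n-1) (k+1) ++
      cellT plateau (PySem.List.pyGetD (PySem.List.pyGetD plateau n []) k 0) n (k-1) ++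
      (if rest ≠ [] ∧ 0 ≤ n ∧ n ≤ (plateau.length : Int) - 1 ∧
          0 ≤ k ∧ k ≤ (plateau.length : Int) - 1 then [[n, k]] else []) ++
      cellT plateau (PySem.List.pyGetD (PySem.List.pyGetD plateau n []) k 0) n (k+1) ++
      cellT plateau (PySem.List.pyGetD (PySem.List.pyGetD plateau n []) k 0) (n+1) (k-1) ++
      cellT plateau (PySem.List.pyGetD (PySem.List.pyGetD plateau n []) k 0) (n+1) k := by
  rw [B_unfold]
  simp only [PySem.List.pyGetD_ofNat', List.getD_cons_zero, List.getD_cons_succ]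
  simp only [inner_row plateau (PySem.List.pyGetD (PySem.List.pyGetD plateau n []) k 0) n k rest]
  rw [flatMap_range_targets [n-1, n, n+1]
        (fun t => gRow plateau (PySem.List.pyGetD (PySem.List.pyGetD plateau n []) k 0) n k t
          (!rest.isEmpty))
        (by simp) plateau.length _ (fun i _ => rfl)]
  simp only [List.flatMap_cons, List.flatMap_nil, List.append_nil, gRow, rowCols]
  simp only [if_neg (show ¬(n = n - 1) by omega), if_neg (show ¬(n + 1 = n - 1) by omega),
    if_neg (show ¬(n + 1 = n) by omega), if_true]
  cases rest with
  | nil =>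
    simp only [List.isEmpty_nil, Bool.not_true, Bool.false_eq_true, if_false,
      List.flatMap_cons, List.flatMap_nil, List.append_nil]
    rw [ite_append_nil, ite_append_nil, ite_append_nil]
    simp only [toCellT]
    rw [if_neg (by simp)]
    simp [List.append_assoc]
  | cons a t =>
    simp only [List.isEmpty_cons, Bool.not_false, if_true,
      List.flatMap_cons, List.flatMap_nil, List.append_nil]
    rw [ite_append_nil, ite_append_nil, ite_append_nil, ite_append_nil]
    simp only [toCellT]
    have hcond : (if ((a :: t : List Int) ≠ [] ∧ 0 ≤ n ∧ n ≤ (plateau.length : Int) - 1 ∧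
          0 ≤ k ∧ k ≤ (plateau.length : Int) - 1) then ([[n, k]] : List (List Int)) else [])
        = (if (0 ≤ n ∧ n ≤ (plateau.length : Int) - 1 ∧ 0 ≤ k ∧ k ≤ (plateau.length : Int) - 1)
           then ([[n, k]] : List (List Int)) else []) := if_congr (by simp) rfl rfl
    rw [hcond, centerT plateau n k]
    simp [List.append_assoc]

-- ===== A-side characterisation (cellProxy / valeur / the colour loop) =====

theorem range3 (a : Int) : PySem.List.pyRange (a-1) (a+2) 1 = [a-1, a, a+1] := by
  rw [PySem.List.pyRange_one_cons (by omega), PySem.List.pyRange_one_cons (by omega),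
      PySem.List.pyRange_one_cons (by omega), PySem.List.pyRange_one_eq_nil (by omega)]
  norm_num

theorem row_eq (plateau : List (List Int)) (n k : Int) (rest : List Int) (x : Int)
    (s : List (List Int)) :
    List.foldl (fun s y =>
      if estDans plateau [x, y] = true then
        if [x, y] ≠ [n-1, k-1] ∧ [x, y] ≠ [n+1, k+1] ∧ [x, y] ≠ n :: k :: rest then
          s ++ [[x, y]]
        else s
      else s) s (PySem.List.pyRange (k-1) (k+2) 1)
    = s ++ ((PySem.List.pyRange (k-1) (k+2) 1).filter (fun y =>
        decide (estDans plateau [x, y] = true ∧ [x, y] ≠ [n-1, k-1] ∧ [x, y] ≠ [n+1, k+1] ∧ [x, y] ≠ n :: k :: rest))).map (fun y => [x, y]) := by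
  rw [← PySem.List.foldl_append_ite
    (fun y => estDans plateau [x, y] = true ∧ [x, y] ≠ [n-1, k-1] ∧ [x, y] ≠ [n+1, k+1] ∧ [x, y] ≠ n :: k :: rest)
    (fun y => [x, y])]
  congr 1
  funext s y
  by_cases h1 : estDans plateau [x, y] = true <;>
    by_cases h2 : [x, y] ≠ [n-1, k-1] ∧ [x, y] ≠ [n+1, k+1] ∧ [x, y] ≠ n :: k :: rest <;>
      simp [h1, h2]

theorem rowTop (plateau : List (List Int)) (n k : Int) (rest : List Int) :
    List.map (fun y => [n-1, y]) ((PySem.List.pyRange (k-1) (k+2) 1).filter (fun y =>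
      decide (estDans plateau [n-1, y] = true ∧ [n-1, y] ≠ [n-1, k-1] ∧ [n-1, y] ≠ [n+1, k+1] ∧ [n-1, y] ≠ n :: k :: rest)))
    = List.filter (fun c => estDans plateau c && decide (c ≠ n :: k :: rest)) [[n-1, k], [n-1, k+1]] := by
  rw [range3 k]
  have e1 : (((k:Int) - 1 = k - 1)) = True := eq_true (by omega)
  have e2 : ((k:Int) = k - 1) = False := eq_false (by omega)
  have e3 : ((k:Int) + 1 = k - 1) = False := eq_false (by omega)
  have e4 : ((n:Int) - 1 = n + 1) = False := eq_false (by omega)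
  have e5 : ((n:Int) - 1 = n) = False := eq_false (by omega)
  simp only [List.filter_cons, List.filter_nil, ne_eq, List.cons.injEq, e1, e2, e3, e4, e5,
    and_true, and_false, false_and, true_and, not_false_eq_true, not_true_eq_false,
    Bool.decide_and, decide_true, decide_false, Bool.and_true, Bool.and_false,
    Bool.true_and, Bool.false_and, decide_eq_true_eq, if_true, if_false,
    Bool.false_eq_true, Bool.decide_eq_true, List.map_cons, List.map_nil]
  split_ifs <;> rfl

theorem rowBot (plateau : List (List Int)) (n k : Int) (rest : List Int) :
    List.map (fun y => [n+1, y]) ((PySem.List.pyRange (k-1) (k+2) 1).filter (fun y =>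
      decide (estDans plateau [n+1, y] = true ∧ [n+1, y] ≠ [n-1, k-1] ∧ [n+1, y] ≠ [n+1, k+1] ∧ [n+1, y] ≠ n :: k :: rest)))
    = List.filter (fun c => estDans plateau c && decide (c ≠ n :: k :: rest)) [[n+1, k-1], [n+1, k]] := by
  rw [range3 k]
  have e1 : ((k:Int) - 1 = k + 1) = False := eq_false (by omega)
  have e2 : ((k:Int) = k + 1) = False := eq_false (by omega)
  have e3 : ((k:Int) + 1 = k + 1) = True := eq_true (by omega)
  have e4 : ((n:Int) + 1 = n - 1) = False := eq_false (by omega)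
  have e5 : ((n:Int) + 1 = n) = False := eq_false (by omega)
  simp only [List.filter_cons, List.filter_nil, ne_eq, List.cons.injEq, e1, e2, e3, e4, e5,
    and_true, and_false, false_and, true_and, not_false_eq_true, not_true_eq_false,
    Bool.decide_and, decide_true, decide_false, Bool.and_true, Bool.and_false,
    Bool.true_and, Bool.false_and, decide_eq_true_eq, if_true, if_false,
    Bool.false_eq_true, Bool.decide_eq_true, List.map_cons, List.map_nil]
  split_ifs <;> rfl

theorem rowMid (plateau : List (List Int)) (n k : Int) (rest : List Int) :
    List.map (fun y => [n, y]) ((PySem.List.pyRange (k-1) (k+2) 1).filter (fun y =>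
      decide (estDans plateau [n, y] = true ∧ [n, y] ≠ [n-1, k-1] ∧ [n, y] ≠ [n+1, k+1] ∧ [n, y] ≠ n :: k :: rest)))
    = List.filter (fun c => estDans plateau c && decide (c ≠ n :: k :: rest)) [[n, k-1], [n, k], [n, k+1]] := by
  rw [range3 k]
  have e2 : ((k:Int) = k - 1) = False := eq_false (by omega)
  have e3 : ((k:Int) + 1 = k - 1) = False := eq_false (by omega)
  have e6 : ((k:Int) - 1 = k + 1) = False := eq_false (by omega)
  have e7 : ((k:Int) = k + 1) = False := eq_false (by omega)
  have e8 : ((k:Int) - 1 = k) = False := eq_false (by omega)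
  have e9 : ((k:Int) + 1 = k) = False := eq_false (by omega)
  have e4 : ((n:Int) = n + 1) = False := eq_false (by omega)
  have e5 : ((n:Int) = n - 1) = False := eq_false (by omega)
  simp only [List.filter_cons, List.filter_nil, ne_eq, List.cons.injEq, e2, e3, e4, e5, e6, e7, e8, e9,
    and_true, and_false, false_and, true_and, not_false_eq_true, not_true_eq_false,
    Bool.decide_and, decide_true, decide_false, Bool.and_true, Bool.and_false,
    Bool.true_and, Bool.false_and, decide_eq_true_eq, if_true, if_false,
    Bool.false_eq_true, Bool.decide_eq_true, List.map_cons, List.map_nil]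
  split_ifs <;> rfl

theorem cellProxy_eq (plateau : List (List Int)) (n k : Int) (rest : List Int) :
    cellProxy plateau (n :: k :: rest) =
      [[n-1,k],[n-1,k+1],[n,k-1],[n,k],[n,k+1],[n+1,k-1],[n+1,k]].filter
        (fun c => estDans plateau c && decide (c ≠ n :: k :: rest)) := by
  simp only [cellProxy, PySem.List.pyGetD_ofNat', List.getD_cons_zero, List.getD_cons_succ]
  rw [range3 n]
  simp only [List.foldl_cons, List.foldl_nil]
  rw [row_eq plateau n k rest (n-1), row_eq plateau n k rest n, row_eq plateau n k rest (n+1)]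
  rw [show ([[n-1,k],[n-1,k+1],[n,k-1],[n,k],[n,k+1],[n+1,k-1],[n+1,k]] : List (List Int))
       = [[n-1,k],[n-1,k+1]] ++ [[n,k-1],[n,k],[n,k+1]] ++ [[n+1,k-1],[n+1,k]] from rfl,
     List.filter_append, List.filter_append]
  rw [rowTop plateau n k rest, rowMid plateau n k rest, rowBot plateau n k rest]
  simp

theorem estDans_pair (plateau : List (List Int)) (x y : Int) :
    estDans plateau [x, y]
      = decide (0 ≤ x ∧ x ≤ (plateau.length:Int)-1 ∧ 0 ≤ y ∧ y ≤ (plateau.length:Int)-1) := by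
  simp only [estDans]
  simp [PySem.List.pyGetD_ofNat', ← decide_not]

theorem valeur_pair (plateau : List (List Int)) (x y : Int) :
    valeur plateau [x, y] = PySem.List.pyGetD (PySem.List.pyGetD plateau x []) y 0 := by
  simp [valeur, PySem.List.pyGetD_ofNat']

theorem valeur_center (plateau : List (List Int)) (n k : Int) (rest : List Int) :
    valeur plateau (n :: k :: rest) = PySem.List.pyGetD (PySem.List.pyGetD plateau n []) k 0 := by
  simp [valeur, PySem.List.pyGetD_ofNat']

theorem cellMemeCouleur_eq (plateau : List (List Int)) (n k : Int) (rest : List Int) :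
    cellMemeCouleur plateau (n :: k :: rest) =
      [[n-1,k],[n-1,k+1],[n,k-1],[n,k],[n,k+1],[n+1,k-1],[n+1,k]].filter
        (fun c => (estDans plateau c && decide (c ≠ n :: k :: rest)) &&
          (valeur plateau c == valeur plateau (n :: k :: rest))) := by
  simp only [cellMemeCouleur]
  rw [cellProxy_eq plateau n k rest, PySem.List.foldl_append_if_eq_filter, List.filter_filter]
  simp only [List.nil_append]
  exact List.filter_congr (fun c _ => by rw [Bool.and_comm])

-- the non-centre candidates are never excluded by the [x,y] != cellule test
theorem qT (plateau : List (List Int)) (n k : Int) (rest : List Int) (x y : Int)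
    (hne : ([x, y] : List Int) ≠ n :: k :: rest) :
    (if ((estDans plateau [x, y] && decide (([x, y] : List Int) ≠ n :: k :: rest)) &&
         (valeur plateau [x, y] == valeur plateau (n :: k :: rest))) = true
     then [([x, y] : List Int)] else [])
      = cellT plateau (PySem.List.pyGetD (PySem.List.pyGetD plateau n []) k 0) x y := by
  rw [estDans_pair, valeur_pair, valeur_center]
  simp only [cellT, hne, decide_true, Bool.and_true, Bool.and_eq_true, decide_eq_true_eq,
    beq_iff_eq, ne_eq, not_false_eq_true]
  refine if_congr ?_ rfl rfl
  tauto

-- the centre candidate survives exactly when cellule is longer than 2 and in bounds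
theorem qCenter (plateau : List (List Int)) (n k : Int) (rest : List Int) :
    (if ((estDans plateau [n, k] && decide (([n, k] : List Int) ≠ n :: k :: rest)) &&
         (valeur plateau [n, k] == valeur plateau (n :: k :: rest))) = true
     then [([n, k] : List Int)] else [])
      = if rest ≠ [] ∧ 0 ≤ n ∧ n ≤ (plateau.length : Int) - 1 ∧
           0 ≤ k ∧ k ≤ (plateau.length : Int) - 1 then [[n, k]] else [] := by
  rw [estDans_pair, valeur_pair, valeur_center]
  have hrest : (([n, k] : List Int) ≠ n :: k :: rest) ↔ rest ≠ [] := by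
    constructor
    · intro h hr; exact h (by rw [hr])
    · intro h he
      exact h (by injection he with _ h2; injection h2 with _ h3; exact h3.symm)
  simp only [BEq.rfl, Bool.and_true, Bool.and_eq_true, decide_eq_true_eq, hrest]
  refine if_congr ?_ rfl rfl
  tauto

theorem A_eq (plateau : List (List Int)) (n k : Int) (rest : List Int) :
    cellMemeCouleur plateau (n :: k :: rest) =
      cellT plateau (PySem.List.pyGetD (PySem.List.pyGetD plateau n []) k 0) (n-1) k ++
      cellT plateau (PySem.List.pyGetD (PySem.List.pyGetD plateau n []) k 0) (n-1) (k+1) ++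
      cellT plateau (PySem.List.pyGetD (PySem.List.pyGetD plateau n []) k 0) n (k-1) ++
      (if rest ≠ [] ∧ 0 ≤ n ∧ n ≤ (plateau.length : Int) - 1 ∧
          0 ≤ k ∧ k ≤ (plateau.length : Int) - 1 then [[n, k]] else []) ++
      cellT plateau (PySem.List.pyGetD (PySem.List.pyGetD plateau n []) k 0) n (k+1) ++
      cellT plateau (PySem.List.pyGetD (PySem.List.pyGetD plateau n []) k 0) (n+1) (k-1) ++
      cellT plateau (PySem.List.pyGetD (PySem.List.pyGetD plateau n []) k 0) (n+1) k := by
  rw [cellMemeCouleur_eq plateau n k rest]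
  rw [show (fun c => (estDans plateau c && decide (c ≠ n :: k :: rest)) &&
        (valeur plateau c == valeur plateau (n :: k :: rest)))
      = (fun c => decide (((estDans plateau c && decide (c ≠ n :: k :: rest)) &&
        (valeur plateau c == valeur plateau (n :: k :: rest))) = true)) from
      funext (fun c => by rw [Bool.decide_eq_true])]
  have hmap := filtermap_eq_flatMap
    (l := ([[n-1,k],[n-1,k+1],[n,k-1],[n,k],[n,k+1],[n+1,k-1],[n+1,k]] : List (List Int)))
    (p := fun c => ((estDans plateau c && decide (c ≠ n :: k :: rest)) &&
        (valeur plateau c == valeur plateau (n :: k :: rest))) = true)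
    (f := id)
  rw [List.map_id] at hmap
  rw [hmap]
  simp only [List.flatMap_cons, List.flatMap_nil, List.append_nil, id_eq]
  rw [qT plateau n k rest (n-1) k (by simp),
      qT plateau n k rest (n-1) (k+1) (by simp),
      qT plateau n k rest n (k-1) (by simp),
      qCenter plateau n k rest,
      qT plateau n k rest n (k+1) (by simp),
      qT plateau n k rest (n+1) (k-1) (by simp),
      qT plateau n k rest (n+1) k (by simp)]
  simp [List.append_assoc]

-- ===== VERDICT =====
theorem cellMemeCouleur_spec : Claim_equal_cellMemeCouleur := by
  intro plateau cellule _ hpre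
  match cellule, hpre with
  | n :: k :: rest, _ =>
    unfold Spec_cellMemeCouleur
    rw [A_eq plateau n k rest, B_eq plateau n k rest]
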